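-- pv_equiv track=rewrite | github.com/bernardkksk/Acdemic-Rag | query.py | _build_library_quotas
-- ===== SOURCE A (Python) =====
-- from typing import Callable, Dict, Iterable, List, Optional, Sequence, Tuple
--
-- def _build_library_quotas(primary_library: dict, secondary_libraries: Sequence[dict], total: int) -> Dict[str, int]:
--     quotas: Dict[str, int] = {}
--     if not secondary_libraries:
--         quotas[primary_library["path"]] = total
--         return quotas
--
--     primary_quota = max(1, int(round(total * 0.8)))
--     remaining = max(0, total - primary_quota)
--     quotas[primary_library["path"]] = primary_quota
--
--     if len(secondary_libraries) == 1:
--         quotas[secondary_libraries[0]["path"]] = remaining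
--     else:
--         share = remaining // len(secondary_libraries)
--         extra = remaining % len(secondary_libraries)
--         for idx, library in enumerate(secondary_libraries):
--             quotas[library["path"]] = share + (1 if idx < extra else 0)
--
--     return quotas
-- ===== SOURCE B (Python) =====
-- def _build_library_quotas(primary_library, secondary_libraries, total):
--     quotas = {}
--     if not secondary_libraries:
--         quotas[primary_library["path"]] = total
--         return quotas
--
--     primary_quota = max(1, int(round(total * 0.8)))
--     quotas[primary_library["path"]] = primary_quota
--
--     # greedy even split: each secondary gets the ceiling of what is left
--     # divided by how many secondaries are left; no share/extra, no index test,
--     # and the single-secondary case needs no special branch.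
--     left = max(0, total - primary_quota)
--     n = len(secondary_libraries)
--     for library in secondary_libraries:
--         give = -(-left // n)
--         quotas[library["path"]] = give
--         left -= give
--         n -= 1
--     return quotas
-- ===== Notes on version B (the rewrite author's own statement) =====
-- stated objective: simpler
-- what changed: Replaced the three-way branch (single secondary special case, and a share//n + extra%n scheme with a per-index comparison) by one greedy loop that gives each secondary the ceiling of the remaining quota over the remaining count; the len==1 branch disappears.
import Mathlib
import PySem

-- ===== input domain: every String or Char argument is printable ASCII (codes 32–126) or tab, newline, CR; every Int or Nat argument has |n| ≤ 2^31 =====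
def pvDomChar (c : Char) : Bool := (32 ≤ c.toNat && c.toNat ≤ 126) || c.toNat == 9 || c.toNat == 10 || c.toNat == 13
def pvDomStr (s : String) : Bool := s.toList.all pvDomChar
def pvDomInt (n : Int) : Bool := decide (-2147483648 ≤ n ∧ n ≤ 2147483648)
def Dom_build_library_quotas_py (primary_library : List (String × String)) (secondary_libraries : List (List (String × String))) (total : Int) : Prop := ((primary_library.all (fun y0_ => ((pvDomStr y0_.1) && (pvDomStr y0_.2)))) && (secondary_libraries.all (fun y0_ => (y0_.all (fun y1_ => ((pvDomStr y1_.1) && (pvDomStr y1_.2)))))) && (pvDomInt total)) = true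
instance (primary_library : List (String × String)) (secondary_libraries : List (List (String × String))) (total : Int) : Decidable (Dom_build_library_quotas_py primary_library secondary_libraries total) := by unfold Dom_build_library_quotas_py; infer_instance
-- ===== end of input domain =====

-- B replaces A's single-secondary special case and share/extra modular scheme by one
-- greedy loop (ceiling of remaining over count left); objective: simpler.

-- ===== PORT A =====
-- lib["path"] (Pre_ guarantees the key is present, so the .getD "" default is never taken)
def pathOf (d : List (String × String)) : String :=
  ((PySem.Dict.mk d).get? "path").getD ""

-- int(round(total * 0.8)): exact on |total| ≤ 2^31 — 4t/5 has fractional part in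
-- {0,.2,.4,.6,.8} (never a .5 tie) and the double error of total*0.8 is < 1e-6,
-- so Python's round equals the nearest integer to 4t/5, i.e. (8t+5)//10.
def round08 (total : Int) : Int := PySem.Int.floordiv (8 * total + 5) 10

def build_library_quotas_py (primary_library : List (String × String)) (secondary_libraries : List (List (String × String))) (total : Int) : List (String × Int) :=
  let quotas : PySem.Dict String Int := PySem.Dict.empty
  if secondary_libraries.isEmpty then
    (quotas.insert (pathOf primary_library) total).items
  else
    let primary_quota := max 1 (round08 total)
    let remaining := max 0 (total - primary_quota)
    let quotas := quotas.insert (pathOf primary_library) primary_quota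
    if secondary_libraries.length == 1 then
      -- secondary_libraries[0]: the branch guarantees the list is nonempty
      (quotas.insert (pathOf (secondary_libraries.headD [])) remaining).items
    else
      let share := PySem.Int.floordiv remaining (secondary_libraries.length : Int)
      let extra := PySem.Int.mod remaining (secondary_libraries.length : Int)
      ((PySem.List.enumerate secondary_libraries 0).foldl
        (fun q p => q.insert (pathOf p.2) (share + if p.1 < extra then 1 else 0)) quotas).items

-- ===== PORT B =====
def bLoop : List (List (String × String)) → PySem.Dict String Int → Int → Int → PySem.Dict String Int
  | [], quotas, _, _ => quotas
  | lib :: rest, quotas, left, n =>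
    let give := -(PySem.Int.floordiv (-left) n)
    bLoop rest (quotas.insert (pathOf lib) give) (left - give) (n - 1)

def build_library_quotas_py_alt (primary_library : List (String × String)) (secondary_libraries : List (List (String × String))) (total : Int) : List (String × Int) :=
  let quotas : PySem.Dict String Int := PySem.Dict.empty
  if secondary_libraries.isEmpty then
    (quotas.insert (pathOf primary_library) total).items
  else
    let primary_quota := max 1 (round08 total)
    let quotas := quotas.insert (pathOf primary_library) primary_quota
    let left := max 0 (total - primary_quota)
    (bLoop secondary_libraries quotas left (secondary_libraries.length : Int)).items

-- ===== PRECONDITION & SPEC =====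
-- Pre_ excludes exactly the inputs on which A raises KeyError: a "path" key missing
-- from the primary dict or from any secondary dict.
def Pre_build_library_quotas_py (primary_library : List (String × String)) (secondary_libraries : List (List (String × String))) (total : Int) : Prop :=
  "path" ∈ primary_library.map Prod.fst ∧
  ∀ lib ∈ secondary_libraries, "path" ∈ lib.map Prod.fst

instance (primary_library : List (String × String)) (secondary_libraries : List (List (String × String))) (total : Int) : Decidable (Pre_build_library_quotas_py primary_library secondary_libraries total) := by unfold Pre_build_library_quotas_py; infer_instance

def pvWitness_build_library_quotas_py : (List (String × String)) × (List (List (String × String))) × Int :=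
  ([("path", "p")], ([[("path", "a")], [("path", "b")], [("path", "c")]], 10))

def Spec_build_library_quotas_py (primary_library : List (String × String)) (secondary_libraries : List (List (String × String))) (total : Int) (out : List (String × Int)) : Prop := out = build_library_quotas_py_alt primary_library secondary_libraries total
instance (primary_library : List (String × String)) (secondary_libraries : List (List (String × String))) (total : Int) (out : List (String × Int)) : Decidable (Spec_build_library_quotas_py primary_library secondary_libraries total out) := by unfold Spec_build_library_quotas_py; infer_instance

-- ===== CLAIM (what is proved, stated in full; the proofs are below) =====
def Claim_equal_build_library_quotas_py : Prop := ∀ (primary_library : List (String × String)) (secondary_libraries : List (List (String × String))) (total : Int), Dom_build_library_quotas_py primary_library secondary_libraries total → Pre_build_library_quotas_py primary_library secondary_libraries total → Spec_build_library_quotas_py primary_library secondary_libraries total (build_library_quotas_py primary_library secondary_libraries total)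

-- ===== LEMMAS AND PROOFS =====

-- A's loop, re-expressed with a running count e of extra units still to hand out.
def aLoop2 : List (List (String × String)) → PySem.Dict String Int → Int → Int → PySem.Dict String Int
  | [], d, _, _ => d
  | lib :: rest, d, q, e => aLoop2 rest (d.insert (pathOf lib) (q + if 0 < e then 1 else 0)) q (e - 1)

lemma enum_fold_eq_aLoop2 (libs : List (List (String × String))) :
    ∀ (k : Int) (d : PySem.Dict String Int) (q r : Int),
    (PySem.List.enumerate libs k).foldl
      (fun dd p => dd.insert (pathOf p.2) (q + if p.1 < r then 1 else 0)) d
      = aLoop2 libs d q (r - k) := by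
  induction libs with
  | nil => intro k d q r; simp [PySem.List.enumerate_nil, aLoop2]
  | cons lib rest ih =>
    intro k d q r
    rw [PySem.List.enumerate_cons]
    simp only [List.foldl_cons, aLoop2]
    have hc : (k < r) ↔ (0 < r - k) := by omega
    simp only [hc]
    rw [ih (k + 1)]
    congr 1
    omega

lemma ceil_div_eq (L a q : Int) (hL : 0 < L) (h1 : (q - 1) * L < a) (h2 : a ≤ q * L) :
    -(PySem.Int.floordiv (-a) L) = q := by
  rw [PySem.Int.neg_floordiv_neg_eq_iff_of_pos hL]
  exact ⟨h1, h2⟩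

lemma bLoop_zero (libs : List (List (String × String))) :
    ∀ (d : PySem.Dict String Int) (q e : Int), 0 ≤ q → e ≤ 0 →
    bLoop libs d (q * libs.length) (libs.length : Int) = aLoop2 libs d q e := by
  induction libs with
  | nil => intro d q e _ _; simp [bLoop, aLoop2]
  | cons lib rest ih =>
    intro d q e hq he
    have hL : (0 : Int) < ((lib :: rest).length : Int) := by
      exact_mod_cast Nat.succ_pos rest.length
    simp only [bLoop, aLoop2]
    have hg : -(PySem.Int.floordiv (-(q * ((lib :: rest).length : Int))) ((lib :: rest).length : Int)) = q := by
      apply ceil_div_eq _ _ _ hL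
      · nlinarith
      · nlinarith
    rw [hg]
    have hval : q + (if 0 < e then (1 : Int) else 0) = q := by
      rw [if_neg (by omega)]; omega
    rw [hval]
    have hlen : ((lib :: rest).length : Int) - 1 = (rest.length : Int) := by
      simp
    have hleft : q * ((lib :: rest).length : Int) - q = q * (rest.length : Int) := by
      simp [List.length_cons]; ring
    rw [hlen, hleft]
    exact ih _ q (e - 1) hq (by omega)

lemma bLoop_eq (libs : List (List (String × String))) :
    ∀ (d : PySem.Dict String Int) (q r : Int), 0 ≤ q → 0 ≤ r → r < (libs.length : Int) →
    bLoop libs d (q * libs.length + r) (libs.length : Int) = aLoop2 libs d q r := by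
  induction libs with
  | nil => intro d q r _ hr hlt; simp at hlt; omega
  | cons lib rest ih =>
    intro d q r hq hr hlt
    rcases eq_or_lt_of_le hr with hr0 | hrpos
    · rw [← hr0, add_zero]
      exact bLoop_zero _ d q 0 hq le_rfl
    · have hL : (0 : Int) < ((lib :: rest).length : Int) := by
        exact_mod_cast Nat.succ_pos rest.length
      simp only [bLoop, aLoop2]
      have hg : -(PySem.Int.floordiv (-(q * ((lib :: rest).length : Int) + r)) ((lib :: rest).length : Int)) = q + 1 := by
        apply ceil_div_eq _ _ _ hL
        · nlinarith
        · nlinarith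
      rw [hg]
      have hval : q + (if 0 < r then (1 : Int) else 0) = q + 1 := by
        rw [if_pos hrpos]
      rw [hval]
      have hlen : ((lib :: rest).length : Int) - 1 = (rest.length : Int) := by simp
      have hleft : q * ((lib :: rest).length : Int) + r - (q + 1) = q * (rest.length : Int) + (r - 1) := by
        simp [List.length_cons]; ring
      rw [hlen, hleft]
      have hlt' : r - 1 < (rest.length : Int) := by
        simp [List.length_cons] at hlt; omega
      exact ih _ q (r - 1) hq (by omega) hlt'

-- ===== VERDICT (by name: the statement is the Claim_ definition above) =====
theorem build_library_quotas_py_spec : Claim_equal_build_library_quotas_py := by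
  intro primary_library secondary_libraries total _ _
  unfold Spec_build_library_quotas_py
  unfold build_library_quotas_py build_library_quotas_py_alt
  match secondary_libraries with
  | [] => simp
  | [x] =>
    simp [bLoop]
  | x :: y :: rest =>
    simp only [List.isEmpty_cons, Bool.false_eq_true, if_false]
    have hlen1 : (((x :: y :: rest).length == 1) = false) := by
      simp [List.length_cons]
    rw [hlen1]
    simp only [Bool.false_eq_true, if_false]
    set libs := x :: y :: rest with hlibs
    set R := max 0 (total - max 1 (round08 total)) with hR
    have hL : (0 : Int) < (libs.length : Int) := by
      rw [hlibs]; exact_mod_cast Nat.succ_pos _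
    have hR0 : 0 ≤ R := by simp [hR]
    set share := PySem.Int.floordiv R (libs.length : Int) with hshare
    set extra := PySem.Int.mod R (libs.length : Int) with hextra
    have hdiv : share = R / (libs.length : Int) := by
      rw [hshare, PySem.Int.floordiv_eq_ediv_of_pos hL]
    have hmod : extra = R % (libs.length : Int) := by
      rw [hextra, PySem.Int.mod_eq_emod_of_pos hL]
    have hsum : share * (libs.length : Int) + extra = R := by
      rw [hdiv, hmod]; rw [mul_comm]; exact Int.ediv_add_emod R _
    have hshare0 : 0 ≤ share := by
      rw [hdiv]; exact Int.ediv_nonneg hR0 (le_of_lt hL)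
    have hextra0 : 0 ≤ extra := by
      rw [hmod]; exact Int.emod_nonneg R (by omega)
    have hextraL : extra < (libs.length : Int) := by
      rw [hmod]; exact Int.emod_lt_of_pos R hL
    rw [enum_fold_eq_aLoop2, sub_zero]
    rw [← hsum]
    rw [bLoop_eq libs _ share extra hshare0 hextra0 hextraL]
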